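-- pv_equiv track=rewrite | github.com/sphildreth/roadie-python | resources/common.py | deriveArtistFromName
-- ===== SOURCE A (Python) =====
-- import string
--
-- def deriveArtistFromName(name):
--     """
--     Ensure that the given name doesnt have usual suspects like "Featuring" or "Ft" or " with" to attempt to return just
--     the artist name
--
--     :param name: str
--     :return: str
--     """
--     if not name:
--         return name
--     removeParts = [" ft. ", " ft ", " feat ", " feat. "]
--     for removePart in removeParts:
--         i = name.lower().find(removePart)
--         if i > -1:
--             name = name[:i]
--     return string.capwords(name)
-- ===== SOURCE B (Python) =====
-- import string
--
-- def deriveArtistFromName(name):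
--     if not name:
--         return name
--     low = name.lower()
--     cut = len(name)
--     for part in (" ft. ", " ft ", " feat ", " feat. "):
--         i = low.find(part)
--         if 0 <= i and i + len(part) <= cut:
--             cut = i
--     return string.capwords(name[:cut])
-- ===== Notes on version B (the rewrite author's own statement) =====
-- stated objective: alternative
-- what changed: A repeatedly lowercases and truncates the string once per marker; B lowercases once, finds each marker once on the original string, and folds only an integer cut position (keeping a found index only if the marker still fits before the current cut), slicing a single time at the end.
import Mathlib
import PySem

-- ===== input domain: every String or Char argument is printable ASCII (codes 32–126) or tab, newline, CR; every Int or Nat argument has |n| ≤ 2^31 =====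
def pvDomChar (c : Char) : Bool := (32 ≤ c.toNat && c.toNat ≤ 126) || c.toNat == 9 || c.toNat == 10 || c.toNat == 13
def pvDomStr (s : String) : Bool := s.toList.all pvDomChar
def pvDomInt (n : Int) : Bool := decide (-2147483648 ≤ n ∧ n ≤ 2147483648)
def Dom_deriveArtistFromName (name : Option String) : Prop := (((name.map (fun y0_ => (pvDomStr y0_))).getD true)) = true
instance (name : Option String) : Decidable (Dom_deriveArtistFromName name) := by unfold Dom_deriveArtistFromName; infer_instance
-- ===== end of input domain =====

-- B replaces A's repeated lower-and-truncate passes by one lowering and one find per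
-- marker on the original string, folding only an integer cut position (objective: simpler).

-- ===== PORT A =====
-- string.capwords helper (both Pythons call string.capwords): ' '.join(w.capitalize() for w in s.split())
def pyCapitalize (s : String) : String :=
  match s.toList with
  | [] => ""
  | c :: cs => String.ofList (PySem.Chars.upperChar c :: cs.map PySem.Chars.lowerChar)

def pyCapwords (s : String) : String :=
  PySem.Str.join " " ((PySem.Str.split₀ s).map pyCapitalize)

def deriveArtistFromName (name : Option String) : Option String :=
  match name with
  | none => none
  | some s =>
    if s = "" then some s
    else
      let removeParts := [" ft. ", " ft ", " feat ", " feat. "]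
      let n := removeParts.foldl
        (fun n removePart =>
          let i := PySem.Str.find (PySem.Str.lower n) removePart
          if i > -1 then PySem.Str.slice n none (some i) else n) s
      some (pyCapwords n)

-- ===== PORT B =====
def deriveArtistFromName_alt (name : Option String) : Option String :=
  match name with
  | none => none
  | some s =>
    if s = "" then some s
    else
      let low := PySem.Str.lower s
      let cut := [" ft. ", " ft ", " feat ", " feat. "].foldl
        (fun cut part =>
          let i := PySem.Str.find low part
          if 0 ≤ i ∧ i + PySem.Str.len part ≤ cut then i else cut)
        (PySem.Str.len s)
      some (pyCapwords (PySem.Str.slice s none (some cut)))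

-- ===== PRECONDITION & SPEC =====
def Spec_deriveArtistFromName (name : Option String) (out : Option String) : Prop := out = deriveArtistFromName_alt name
instance (name : Option String) (out : Option String) : Decidable (Spec_deriveArtistFromName name out) := by unfold Spec_deriveArtistFromName; infer_instance

-- ===== CLAIM (what is proved, stated in full; the proofs are below) =====
def Claim_equal_deriveArtistFromName : Prop := ∀ (name : Option String), Dom_deriveArtistFromName name → Spec_deriveArtistFromName name (deriveArtistFromName name)

-- ===== LEMMAS AND PROOFS =====

-- B's cut update, stated on char lists with a Nat cut
def stepB (s m : List Char) (c : Nat) : Nat :=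
  if 0 ≤ PySem.Chars.find (PySem.Chars.lower s) m ∧
     (PySem.Chars.find (PySem.Chars.lower s) m).toNat + m.length ≤ c
  then (PySem.Chars.find (PySem.Chars.lower s) m).toNat else c

-- find on a prefix: the first occurrence survives truncation iff it still fits
theorem find_take_eq (L m : List Char) (c : Nat) :
    PySem.Chars.find (L.take c) m =
      (if 0 ≤ PySem.Chars.find L m ∧ (PySem.Chars.find L m).toNat + m.length ≤ c
       then PySem.Chars.find L m else -1) := by
  rcases List.eq_nil_or_concat m with hm | ⟨t, a, hm⟩
  · subst hm
    simp [PySem.Chars.find_nil]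
  have hmlen : 0 < m.length := by subst hm; simp
  by_cases h0 : 0 ≤ PySem.Chars.find L m
  · obtain ⟨hpre, hmin⟩ := PySem.Chars.find_spec h0
    by_cases hfit : (PySem.Chars.find L m).toNat + m.length ≤ c
    · rw [if_pos ⟨h0, hfit⟩]
      have hocc : m <+: (L.take c).drop (PySem.Chars.find L m).toNat := by
        rw [List.drop_take]
        exact List.prefix_take_iff.mpr ⟨hpre, by omega⟩
      have h0' : 0 ≤ PySem.Chars.find (L.take c) m := by
        rw [PySem.Chars.find_nonneg_iff, ← PySem.Chars.isIn_iff_infix,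
          ← PySem.Chars.exists_prefix_drop_iff_isIn]
        exact ⟨_, hocc⟩
      obtain ⟨hpre', hmin'⟩ := PySem.Chars.find_spec h0'
      have hji : ¬ (PySem.Chars.find L m).toNat < (PySem.Chars.find (L.take c) m).toNat :=
        fun h => hmin' _ h hocc
      have htrans : m <+: L.drop (PySem.Chars.find (L.take c) m).toNat := by
        have h' := hpre'
        rw [List.drop_take] at h'
        exact (List.prefix_take_iff.mp h').1
      have hij : ¬ (PySem.Chars.find (L.take c) m).toNat < (PySem.Chars.find L m).toNat :=
        fun h => hmin _ h htrans
      omega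
    · rw [if_neg (by omega)]
      rw [PySem.Chars.find_eq_neg_one_iff]
      intro hinf
      obtain ⟨j, hj⟩ := (PySem.Chars.exists_prefix_drop_iff_isIn m (L.take c)).mpr
        ((PySem.Chars.isIn_iff_infix m _).mpr hinf)
      rw [List.drop_take] at hj
      obtain ⟨hj1, hj2⟩ := List.prefix_take_iff.mp hj
      have hij : ¬ j < (PySem.Chars.find L m).toNat := fun h => hmin j h hj1
      omega
  · have hneg : PySem.Chars.find L m = -1 := by
      have := PySem.Chars.neg_one_le_find L m
      omega
    rw [if_neg (by omega)]
    rw [PySem.Chars.find_eq_neg_one_iff] at hneg ⊢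
    exact fun hinf => hneg (hinf.trans (List.take_prefix c L).isInfix)

-- one marker step at char-list level: A's truncation of (take c s) is take (stepB s m c) s
theorem stepA_take (s m : List Char) (c : Nat) :
    (let i := PySem.Chars.find (PySem.Chars.lower (s.take c)) m
     if i > -1 then PySem.List.slice (s.take c) none (some i) else s.take c)
    = s.take (stepB s m c) := by
  have hl : PySem.Chars.lower (s.take c) = (PySem.Chars.lower s).take c := by
    simp [PySem.Chars.lower]
  show (if PySem.Chars.find (PySem.Chars.lower (s.take c)) m > -1
        then PySem.List.slice (s.take c) none (some (PySem.Chars.find (PySem.Chars.lower (s.take c)) m))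
        else s.take c) = s.take (stepB s m c)
  rw [hl, find_take_eq, stepB]
  by_cases hcond : 0 ≤ PySem.Chars.find (PySem.Chars.lower s) m ∧
      (PySem.Chars.find (PySem.Chars.lower s) m).toNat + m.length ≤ c
  · rw [if_pos hcond, if_pos hcond, if_pos (by omega),
      PySem.List.slice_to _ hcond.1, List.take_take]
    congr 1
    omega
  · rw [if_neg hcond, if_neg hcond, if_neg (by omega)]

-- A's whole loop at char-list level
theorem foldA_take (s : List Char) (M : List (List Char)) (c : Nat) :
    M.foldl (fun t m =>
        let i := PySem.Chars.find (PySem.Chars.lower t) m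
        if i > -1 then PySem.List.slice t none (some i) else t) (s.take c)
    = s.take (M.foldl (fun c m => stepB s m c) c) := by
  induction M generalizing c with
  | nil => rfl
  | cons m M ih =>
    simp only [List.foldl_cons]
    rw [stepA_take, ih]

-- A's string fold computes the char-list fold
theorem foldStr_toList (M : List String) (n : String) :
    (M.foldl (fun n removePart =>
        let i := PySem.Str.find (PySem.Str.lower n) removePart
        if i > -1 then PySem.Str.slice n none (some i) else n) n).toList
    = (M.map String.toList).foldl (fun t m =>
        let i := PySem.Chars.find (PySem.Chars.lower t) m
        if i > -1 then PySem.List.slice t none (some i) else t) n.toList := by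
  induction M generalizing n with
  | nil => rfl
  | cons p M ih =>
    simp only [List.foldl_cons, List.map_cons]
    rw [ih]
    congr 1
    simp only [PySem.Str.find_eq, PySem.Str.toList_lower]
    split_ifs with h
    · simp
    · rfl

-- B's Int fold computes the Nat fold of stepB
theorem foldB_int (s : String) (M : List String) (c : Nat) :
    M.foldl (fun cut part =>
        let i := PySem.Str.find (PySem.Str.lower s) part
        if 0 ≤ i ∧ i + PySem.Str.len part ≤ cut then i else cut) (c : Int)
    = ((M.map String.toList).foldl (fun c m => stepB s.toList m c) c : Nat) := by
  induction M generalizing c with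
  | nil => rfl
  | cons p M ih =>
    simp only [List.foldl_cons, List.map_cons]
    have hstep : (let i := PySem.Str.find (PySem.Str.lower s) p
        if 0 ≤ i ∧ i + PySem.Str.len p ≤ (c : Int) then i else (c : Int))
        = ((stepB s.toList p.toList c : Nat) : Int) := by
      simp only [PySem.Str.find_eq, PySem.Str.toList_lower, PySem.Str.len, stepB]
      split_ifs with h1 h2 h2
      · omega
      · exact absurd ⟨h1.1, by omega⟩ h2
      · exact absurd ⟨h2.1, by omega⟩ h1
      · rfl
    rw [hstep, ih]

-- the loop results of A and B name the same string
theorem strings_eq (s : String) :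
    [" ft. ", " ft ", " feat ", " feat. "].foldl
      (fun n removePart =>
        let i := PySem.Str.find (PySem.Str.lower n) removePart
        if i > -1 then PySem.Str.slice n none (some i) else n) s
    = PySem.Str.slice s none
        (some ([" ft. ", " ft ", " feat ", " feat. "].foldl
          (fun cut part =>
            let i := PySem.Str.find (PySem.Str.lower s) part
            if 0 ≤ i ∧ i + PySem.Str.len part ≤ cut then i else cut) (PySem.Str.len s))) := by
  apply String.toList_inj.mp
  rw [foldStr_toList]
  have hA := foldA_take s.toList
    ([" ft. ", " ft ", " feat ", " feat. "].map String.toList) s.toList.length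
  rw [List.take_length] at hA
  rw [hA]
  rw [PySem.Str.toList_slice, PySem.Chars.slice_eq_listSlice]
  rw [show PySem.Str.len s = ((s.toList.length : Nat) : Int) from rfl, foldB_int]
  rw [PySem.List.slice_to _ (by exact_mod_cast Nat.zero_le _)]
  simp

-- ===== VERDICT (by name: the statement is the Claim_ definition above) =====
theorem deriveArtistFromName_spec : Claim_equal_deriveArtistFromName := by
  intro name _
  show deriveArtistFromName name = deriveArtistFromName_alt name
  cases name with
  | none => rfl
  | some s =>
    by_cases hs : s = ""
    · simp only [deriveArtistFromName, deriveArtistFromName_alt, if_pos hs]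
    · simp only [deriveArtistFromName, deriveArtistFromName_alt, if_neg hs]
      exact congrArg (fun t => some (pyCapwords t)) (strings_eq s)
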